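-- pv_equiv track=rewrite | github.com/adrmisty/hmm-pos-tagger | heuristics.py | _en_multiword_propn
-- ===== SOURCE A (Python) =====
-- from typing import List, Tuple
--
-- TaggedSentence = List[Tuple[str, str]]
--
-- def _en_multiword_propn(sentence: TaggedSentence) -> TaggedSentence:
--     """
--     English-specific heuristic:
--     Promote NOUN -> PROPN only for capitalized multi-word proper nouns.
--
--     Rule:
--         If a token is tagged as NOUN and:
--           - it starts with a capital letter (and not a digit), AND
--           - it is adjacent to a token tagged as PROPN that also starts
--             with a capital letter,
--         then relabel it as PROPN.
--
--     This aims to capture things like: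
--         - 'New York'          → New/PROPN York/PROPN
--         - 'San Francisco Bay' → San/PROPN Francisco/PROPN Bay/PROPN
--     while avoiding noun-noun compounds like:
--         - 'street market'
--         - 'animal rights group'
--     """
--
--     def _is_capitalized(w: str) -> bool:
--         return bool(w) and w[0].isupper() and not w[0].isdigit()
--
--     new_sentence: TaggedSentence = []
--
--     for i, (word, tag) in enumerate(sentence):
--         new_tag = tag
--
--         if tag == 'NOUN' and _is_capitalized(word):
--             prev_is_cap_propn = (
--                 i > 0
--                 and sentence[i - 1][1] == 'PROPN'
--                 and _is_capitalized(sentence[i - 1][0])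
--             )
--             next_is_cap_propn = (
--                 i < len(sentence) - 1
--                 and sentence[i + 1][1] == 'PROPN'
--                 and _is_capitalized(sentence[i + 1][0])
--             )
--
--             if prev_is_cap_propn or next_is_cap_propn:
--                 new_tag = 'PROPN'
--
--         new_sentence.append((word, new_tag))
--
--     return new_sentence
-- ===== SOURCE B (Python) =====
-- from typing import List, Tuple
--
-- TaggedSentence = List[Tuple[str, str]]
--
-- def _en_multiword_propn(sentence: TaggedSentence) -> TaggedSentence:
--     """Anchor-scatter re-implementation: instead of inspecting each NOUN's
--     neighbors, iterate over the capitalized-PROPN anchor tokens and scatter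
--     their neighbor positions into a set; a NOUN is promoted iff its own index
--     landed in that set (and it is capitalized)."""
--
--     def _is_capitalized(w: str) -> bool:
--         return bool(w) and w[0].isupper() and not w[0].isdigit()
--
--     promote = set()
--     for i, (word, tag) in enumerate(sentence):
--         if tag == 'PROPN' and _is_capitalized(word):
--             promote.add(i - 1)
--             promote.add(i + 1)
--
--     return [
--         (word, 'PROPN' if i in promote and tag == 'NOUN' and _is_capitalized(word) else tag)
--         for i, (word, tag) in enumerate(sentence)
--     ]
-- ===== Notes on version B (the rewrite author's own statement) =====
-- stated objective: alternative
-- what changed: Inverts the data flow: instead of A's gather (each NOUN inspects its two neighbors by index), B scatters from the capitalized-PROPN anchor tokens, collecting their neighbor positions into a set in a first pass, then promotes a capitalized NOUN iff its own index is in that set.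
import Mathlib
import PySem

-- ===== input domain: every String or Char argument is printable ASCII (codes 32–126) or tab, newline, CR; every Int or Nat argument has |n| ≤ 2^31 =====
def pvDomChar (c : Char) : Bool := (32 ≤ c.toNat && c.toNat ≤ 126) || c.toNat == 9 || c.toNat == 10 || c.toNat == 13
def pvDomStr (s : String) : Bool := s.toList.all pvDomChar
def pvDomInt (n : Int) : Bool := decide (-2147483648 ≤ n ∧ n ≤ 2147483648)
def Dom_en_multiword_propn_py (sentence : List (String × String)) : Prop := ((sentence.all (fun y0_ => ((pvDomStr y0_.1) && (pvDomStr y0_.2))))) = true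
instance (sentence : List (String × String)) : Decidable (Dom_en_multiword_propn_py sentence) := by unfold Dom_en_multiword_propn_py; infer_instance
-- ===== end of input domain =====

-- B inverts the data flow: it scatters neighbor indices of capitalized-PROPN anchors into a set,
-- then promotes a capitalized NOUN iff its index is in that set ("alternative"; same values as A).

-- ===== PORT A =====
-- _is_capitalized(w): bool(w) and w[0].isupper() and not w[0].isdigit()  (shared verbatim by A and B)
def pyIsCapitalized (w : String) : Bool :=
  match w.toList with
  | [] => false
  | c :: _ => PySem.Chars.isupper c && !(PySem.Chars.isdigit c)

def en_multiword_propn_py (sentence : List (String × String)) : List (String × String) :=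
  (PySem.List.enumerate sentence).foldl (fun new_sentence iwt =>
    let i := iwt.1
    let word := iwt.2.1
    let tag := iwt.2.2
    let new_tag :=
      if tag == "NOUN" && pyIsCapitalized word then
        let prev_is_cap_propn :=
          decide (i > 0) && ((PySem.List.pyGetD sentence (i - 1) ("", "")).2 == "PROPN")
            && pyIsCapitalized (PySem.List.pyGetD sentence (i - 1) ("", "")).1
        let next_is_cap_propn :=
          decide (i < (sentence.length : Int) - 1) && ((PySem.List.pyGetD sentence (i + 1) ("", "")).2 == "PROPN")
            && pyIsCapitalized (PySem.List.pyGetD sentence (i + 1) ("", "")).1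
        if prev_is_cap_propn || next_is_cap_propn then "PROPN" else tag
      else tag
    new_sentence ++ [(word, new_tag)]) []

-- ===== PORT B =====
-- the anchor-scatter loop: for each capitalized PROPN at index i, add i-1 and i+1 to the set
def promoteSet (sentence : List (String × String)) : PySem.Set Int :=
  (PySem.List.enumerate sentence).foldl (fun promote iwt =>
    if iwt.2.2 == "PROPN" && pyIsCapitalized iwt.2.1 then
      PySem.Set.add (PySem.Set.add promote (iwt.1 - 1)) (iwt.1 + 1)
    else promote) PySem.Set.empty

def en_multiword_propn_py_alt (sentence : List (String × String)) : List (String × String) :=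
  let promote := promoteSet sentence
  (PySem.List.enumerate sentence).map (fun iwt =>
    (iwt.2.1,
      if PySem.Set.contains promote iwt.1 && (iwt.2.2 == "NOUN") && pyIsCapitalized iwt.2.1
      then "PROPN" else iwt.2.2))

-- ===== PRECONDITION & SPEC =====
def Spec_en_multiword_propn_py (sentence : List (String × String)) (out : List (String × String)) : Prop := out = en_multiword_propn_py_alt sentence
instance (sentence : List (String × String)) (out : List (String × String)) : Decidable (Spec_en_multiword_propn_py sentence out) := by unfold Spec_en_multiword_propn_py; infer_instance

-- ===== CLAIM (what is proved, stated in full; the proofs are below) =====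
def Claim_equal_en_multiword_propn_py : Prop := ∀ (sentence : List (String × String)), Dom_en_multiword_propn_py sentence → Spec_en_multiword_propn_py sentence (en_multiword_propn_py sentence)

-- ===== LEMMAS AND PROOFS =====

-- aFun is the per-token body of A's loop; A_eq_map rewrites A's foldl-append as a map over enumerate.
def aFun (sentence : List (String × String)) (iwt : Int × (String × String)) : String × String :=
  (iwt.2.1,
    if iwt.2.2 == "NOUN" && pyIsCapitalized iwt.2.1 then
      if (decide (iwt.1 > 0) && ((PySem.List.pyGetD sentence (iwt.1 - 1) ("", "")).2 == "PROPN")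
            && pyIsCapitalized (PySem.List.pyGetD sentence (iwt.1 - 1) ("", "")).1)
         || (decide (iwt.1 < (sentence.length : Int) - 1) && ((PySem.List.pyGetD sentence (iwt.1 + 1) ("", "")).2 == "PROPN")
            && pyIsCapitalized (PySem.List.pyGetD sentence (iwt.1 + 1) ("", "")).1)
      then "PROPN" else iwt.2.2
    else iwt.2.2)

lemma A_eq_map (s : List (String × String)) :
    en_multiword_propn_py s = (PySem.List.enumerate s).map (aFun s) := by
  unfold en_multiword_propn_py
  rw [show (fun (new_sentence : List (String × String)) iwt =>
    let i := iwt.1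
    let word := iwt.2.1
    let tag := iwt.2.2
    let new_tag :=
      if tag == "NOUN" && pyIsCapitalized word then
        let prev_is_cap_propn :=
          decide (i > 0) && ((PySem.List.pyGetD s (i - 1) ("", "")).2 == "PROPN")
            && pyIsCapitalized (PySem.List.pyGetD s (i - 1) ("", "")).1
        let next_is_cap_propn :=
          decide (i < (s.length : Int) - 1) && ((PySem.List.pyGetD s (i + 1) ("", "")).2 == "PROPN")
            && pyIsCapitalized (PySem.List.pyGetD s (i + 1) ("", "")).1
        if prev_is_cap_propn || next_is_cap_propn then "PROPN" else tag
      else tag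
    new_sentence ++ [(word, new_tag)]) = (fun acc iwt => acc ++ [aFun s iwt]) from rfl,
    PySem.List.foldl_append_singleton_eq_map]
  simp

-- membership in B's scatter fold: j landed in the set iff some processed pair is an anchor with j adjacent
lemma mem_scatter_fold (l : List (Int × (String × String))) (acc : PySem.Set Int) (j : Int) :
    j ∈ l.foldl (fun promote iwt =>
        if iwt.2.2 == "PROPN" && pyIsCapitalized iwt.2.1 then
          PySem.Set.add (PySem.Set.add promote (iwt.1 - 1)) (iwt.1 + 1)
        else promote) acc
    ↔ j ∈ acc ∨ ∃ p ∈ l, (p.2.2 == "PROPN" && pyIsCapitalized p.2.1) = true ∧ (j = p.1 - 1 ∨ j = p.1 + 1) := by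
  induction l generalizing acc with
  | nil => simp
  | cons x xs ih =>
    simp only [List.foldl_cons, List.mem_cons, exists_eq_or_imp]
    by_cases hx : (x.2.2 == "PROPN" && pyIsCapitalized x.2.1) = true
    · rw [if_pos hx, ih]
      simp only [PySem.Set.mem_add, hx, true_and, or_assoc]
    · rw [if_neg hx, ih]
      simp only [hx, Bool.false_eq_true, false_and, false_or]

-- the token fetched by A's neighbor indexing is the list element, for an in-range Nat index
lemma pyGetD_at_nat (s : List (String × String)) (m : Nat) (hm : m < s.length) :
    PySem.List.pyGetD s ((m : Nat) : Int) ("", "") = s[m] := by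
  rw [PySem.List.pyGetD_natCast]
  simp [List.getD_eq_getElem?_getD, List.getElem?_eq_getElem hm]

-- contains on B's set coincides with A's neighbor test, at any in-range index
lemma contains_promote (s : List (String × String)) (k : Nat) (hk : k < s.length) :
    PySem.Set.contains (promoteSet s) ((k : Nat) : Int)
    = ((decide (((k : Nat) : Int) > 0) && ((PySem.List.pyGetD s (((k : Nat) : Int) - 1) ("", "")).2 == "PROPN")
          && pyIsCapitalized (PySem.List.pyGetD s (((k : Nat) : Int) - 1) ("", "")).1)
       || (decide (((k : Nat) : Int) < (s.length : Int) - 1) && ((PySem.List.pyGetD s (((k : Nat) : Int) + 1) ("", "")).2 == "PROPN")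
          && pyIsCapitalized (PySem.List.pyGetD s (((k : Nat) : Int) + 1) ("", "")).1)) := by
  rw [Bool.eq_iff_iff]
  unfold promoteSet
  rw [PySem.Set.contains_iff, mem_scatter_fold]
  simp only [PySem.Set.empty, List.not_mem_nil, false_or, PySem.List.mem_enumerate_iff,
    Bool.or_eq_true, Bool.and_eq_true, decide_eq_true_iff]
  constructor
  · rintro ⟨p, ⟨m, hm, rfl⟩, ⟨hp, hc⟩, hadj⟩
    simp only [zero_add] at hadj ⊢
    rcases hadj with h1 | h2
    · -- k = m - 1, so m = k + 1 : the NEXT token is the anchor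
      have hmk : m = k + 1 := by omega
      subst hmk
      have hcast : ((k : Nat) : Int) + 1 = (((k + 1 : Nat)) : Int) := by push_cast; ring
      rw [hcast, pyGetD_at_nat s (k + 1) hm]
      exact Or.inr ⟨⟨by omega, hp⟩, hc⟩
    · -- k = m + 1, so m = k - 1 : the PREVIOUS token is the anchor
      have hk0 : 0 < k := by omega
      have hmk : m = k - 1 := by omega
      subst hmk
      have hcast : ((k : Nat) : Int) - 1 = (((k - 1 : Nat)) : Int) := by omega
      rw [hcast, pyGetD_at_nat s (k - 1) hm]
      exact Or.inl ⟨⟨by omega, hp⟩, hc⟩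
  · intro h
    rcases h with ⟨⟨hk0, hp⟩, hc⟩ | ⟨⟨hk1, hp⟩, hc⟩
    · have hm : k - 1 < s.length := by omega
      have hcast : ((k : Nat) : Int) - 1 = (((k - 1 : Nat)) : Int) := by omega
      rw [hcast, pyGetD_at_nat s (k - 1) hm] at hp hc
      refine ⟨((k - 1 : Nat), s[k - 1]), ⟨k - 1, hm, by simp⟩, by simp [hp, hc], Or.inr (by omega)⟩
    · have hm : k + 1 < s.length := by omega
      have hcast : ((k : Nat) : Int) + 1 = (((k + 1 : Nat)) : Int) := by push_cast; ring
      rw [hcast, pyGetD_at_nat s (k + 1) hm] at hp hc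
      refine ⟨((k + 1 : Nat), s[k + 1]), ⟨k + 1, hm, by simp⟩, by simp [hp, hc], Or.inl (by omega)⟩

theorem a_eq_b (s : List (String × String)) :
    en_multiword_propn_py s = en_multiword_propn_py_alt s := by
  rw [A_eq_map]
  unfold en_multiword_propn_py_alt
  apply List.map_congr_left
  intro p hp
  rw [PySem.List.mem_enumerate_iff] at hp
  obtain ⟨k, hk, rfl⟩ := hp
  simp only [zero_add]
  unfold aFun
  simp only
  rw [contains_promote s k hk]
  by_cases hc : (s[k].2 == "NOUN" && pyIsCapitalized s[k].1) = true
  · simp only [Bool.and_eq_true] at hc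
    simp [hc.1, hc.2]
  · simp only [Bool.and_eq_true, not_and_or] at hc
    rcases hc with h | h <;> simp [h]

-- ===== VERDICT (by name: the statement is the Claim_ definition above) =====
theorem en_multiword_propn_py_spec : Claim_equal_en_multiword_propn_py := by
  intro s _
  exact a_eq_b s
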